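-- pv_equiv track=rewrite | github.com/max-dingsda/smartgallery-plugin-model-manager | backend.py | detect_architecture_from_keys
-- ===== SOURCE A (Python) =====
-- def detect_architecture_from_keys(metadata_keys):
--     """Detect model architecture from safetensors keys"""
--     keys_lower = [k.lower() for k in metadata_keys]
--     keys_str = ' '.join(keys_lower)
--
--     if any('cascade' in k or 'effnet' in k for k in keys_lower):
--         return 'Stable Cascade'
--     if any('pony' in k for k in keys_lower):
--         return 'Pony'
--     if 'model.diffusion_model.joint_blocks.0.x_block.attn.qkv.weight' in metadata_keys:
--         return 'Flux'
--     if any('double_blocks' in k or 'single_blocks' in k for k in keys_lower):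
--         return 'Flux'
--     if any('down_blocks.2.attentions.1.transformer_blocks.9' in k for k in metadata_keys):
--         return 'SDXL'
--     if any('cond_stage_model.transformer.text_model.embeddings' in k for k in metadata_keys):
--         return 'SD 1.x/2.x'
--
--     return 'Unknown'
-- ===== SOURCE B (Python) =====
-- def detect_architecture_from_keys(metadata_keys):
--     """Detect model architecture from safetensors keys (single pass over keys)."""
--     cascade = pony = flux_exact = flux_blocks = sdxl = sd = False
--     for k in metadata_keys:
--         kl = k.lower()
--         cascade = cascade or 'cascade' in kl or 'effnet' in kl
--         pony = pony or 'pony' in kl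
--         flux_exact = flux_exact or k == 'model.diffusion_model.joint_blocks.0.x_block.attn.qkv.weight'
--         flux_blocks = flux_blocks or 'double_blocks' in kl or 'single_blocks' in kl
--         sdxl = sdxl or 'down_blocks.2.attentions.1.transformer_blocks.9' in k
--         sd = sd or 'cond_stage_model.transformer.text_model.embeddings' in k
--     if cascade:
--         return 'Stable Cascade'
--     if pony:
--         return 'Pony'
--     if flux_exact or flux_blocks:
--         return 'Flux'
--     if sdxl:
--         return 'SDXL'
--     if sd:
--         return 'SD 1.x/2.x'
--     return 'Unknown'
-- ===== Notes on version B (the rewrite author's own statement) =====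
-- stated objective: alternative
-- what changed: Replaces six sequential any-scans (plus an unused join and a pre-built lowered list) with a single pass that lowers each key once and accumulates six boolean flags, then evaluates the same precedence ladder.
import Mathlib
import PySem

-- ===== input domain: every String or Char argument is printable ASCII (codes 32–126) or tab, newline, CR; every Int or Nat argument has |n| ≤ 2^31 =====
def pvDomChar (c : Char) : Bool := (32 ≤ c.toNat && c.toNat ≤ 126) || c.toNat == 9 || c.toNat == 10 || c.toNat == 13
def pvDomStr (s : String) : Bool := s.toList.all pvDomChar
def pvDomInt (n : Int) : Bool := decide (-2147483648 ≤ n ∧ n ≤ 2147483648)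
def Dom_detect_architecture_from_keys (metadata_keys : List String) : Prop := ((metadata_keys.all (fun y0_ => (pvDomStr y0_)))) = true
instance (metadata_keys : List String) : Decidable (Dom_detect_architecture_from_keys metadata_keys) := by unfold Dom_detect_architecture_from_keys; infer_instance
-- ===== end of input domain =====

-- ===== PORT A =====
-- B replaces six sequential any-scans with one flag-accumulating pass; same results (objective: alternative).
def detect_architecture_from_keys (metadata_keys : List String) : String :=
  let keys_lower := metadata_keys.map (fun k => PySem.Str.lower k)
  let _keys_str := PySem.Str.join " " keys_lower
  if keys_lower.any (fun k => PySem.Str.isIn "cascade" k || PySem.Str.isIn "effnet" k) then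
    "Stable Cascade"
  else if keys_lower.any (fun k => PySem.Str.isIn "pony" k) then
    "Pony"
  else if metadata_keys.any (fun k => k == "model.diffusion_model.joint_blocks.0.x_block.attn.qkv.weight") then
    "Flux"
  else if keys_lower.any (fun k => PySem.Str.isIn "double_blocks" k || PySem.Str.isIn "single_blocks" k) then
    "Flux"
  else if metadata_keys.any (fun k => PySem.Str.isIn "down_blocks.2.attentions.1.transformer_blocks.9" k) then
    "SDXL"
  else if metadata_keys.any (fun k => PySem.Str.isIn "cond_stage_model.transformer.text_model.embeddings" k) then
    "SD 1.x/2.x"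
  else
    "Unknown"

-- ===== PORT B =====
-- one loop step: update the six flags for key k (k lowered once)
def pvFlagStep (st : Bool × Bool × Bool × Bool × Bool × Bool) (k : String) :
    Bool × Bool × Bool × Bool × Bool × Bool :=
  let kl := PySem.Str.lower k
  (st.1 || PySem.Str.isIn "cascade" kl || PySem.Str.isIn "effnet" kl,
   st.2.1 || PySem.Str.isIn "pony" kl,
   st.2.2.1 || (k == "model.diffusion_model.joint_blocks.0.x_block.attn.qkv.weight"),
   st.2.2.2.1 || PySem.Str.isIn "double_blocks" kl || PySem.Str.isIn "single_blocks" kl,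
   st.2.2.2.2.1 || PySem.Str.isIn "down_blocks.2.attentions.1.transformer_blocks.9" k,
   st.2.2.2.2.2 || PySem.Str.isIn "cond_stage_model.transformer.text_model.embeddings" k)

def detect_architecture_from_keys_alt (metadata_keys : List String) : String :=
  let st := metadata_keys.foldl pvFlagStep (false, false, false, false, false, false)
  if st.1 then "Stable Cascade"
  else if st.2.1 then "Pony"
  else if st.2.2.1 || st.2.2.2.1 then "Flux"
  else if st.2.2.2.2.1 then "SDXL"
  else if st.2.2.2.2.2 then "SD 1.x/2.x"
  else "Unknown"

-- ===== PRECONDITION & SPEC =====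
def Spec_detect_architecture_from_keys (metadata_keys : List String) (out : String) : Prop := out = detect_architecture_from_keys_alt metadata_keys
instance (metadata_keys : List String) (out : String) : Decidable (Spec_detect_architecture_from_keys metadata_keys out) := by unfold Spec_detect_architecture_from_keys; infer_instance

-- ===== CLAIM (what is proved, stated in full; the proofs are below) =====
def Claim_equal_detect_architecture_from_keys : Prop := ∀ (metadata_keys : List String), Dom_detect_architecture_from_keys metadata_keys → Spec_detect_architecture_from_keys metadata_keys (detect_architecture_from_keys metadata_keys)

-- ===== LEMMAS AND PROOFS =====

-- the folded flags are exactly the six `any`s, OR-ed onto the initial accumulator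
theorem pvFlags_eq (l : List String) (c p fe fb x s : Bool) :
    l.foldl pvFlagStep (c, p, fe, fb, x, s) =
      (c || l.any (fun k => PySem.Str.isIn "cascade" (PySem.Str.lower k) || PySem.Str.isIn "effnet" (PySem.Str.lower k)),
       p || l.any (fun k => PySem.Str.isIn "pony" (PySem.Str.lower k)),
       fe || l.any (fun k => k == "model.diffusion_model.joint_blocks.0.x_block.attn.qkv.weight"),
       fb || l.any (fun k => PySem.Str.isIn "double_blocks" (PySem.Str.lower k) || PySem.Str.isIn "single_blocks" (PySem.Str.lower k)),
       x || l.any (fun k => PySem.Str.isIn "down_blocks.2.attentions.1.transformer_blocks.9" k),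
       s || l.any (fun k => PySem.Str.isIn "cond_stage_model.transformer.text_model.embeddings" k)) := by
  induction l generalizing c p fe fb x s with
  | nil => simp
  | cons h t ih =>
      simp only [List.foldl_cons, List.any_cons, pvFlagStep, ih]
      simp [Bool.or_assoc]

-- ===== VERDICT (by name: the statement is the Claim_ definition above) =====
theorem detect_architecture_from_keys_spec : Claim_equal_detect_architecture_from_keys := by
  intro metadata_keys _
  unfold Spec_detect_architecture_from_keys detect_architecture_from_keys detect_architecture_from_keys_alt
  simp only [pvFlags_eq, List.any_map, Bool.false_or, Function.comp_def]
  by_cases h : (metadata_keys.any fun k => k == "model.diffusion_model.joint_blocks.0.x_block.attn.qkv.weight") = true <;>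
    simp [h]
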